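-- pv_equiv track=rewrite | github.com/AsherGlick/Burrito | xml_converter/generators/generate_cpp.py | insert_delimiter
-- ===== SOURCE A (Python) =====
-- def insert_delimiter(word: str, delimiter: str = "_") -> str:
--     delimitered_word_array = []
--
--     for i, letter in enumerate(word):
--         if letter.isupper():
--             if i != 0:
--                 delimitered_word_array.append(delimiter)
--             delimitered_word_array.append(letter.lower())
--         else:
--             delimitered_word_array.append(letter)
--
--     return "".join(delimitered_word_array)
-- ===== SOURCE B (Python) =====
-- def insert_delimiter(word: str, delimiter: str = "_") -> str:
--     segments = []
--     for letter in word: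
--         if letter.isupper():
--             segments.append(letter.lower())
--         elif segments:
--             segments[-1] += letter
--         else:
--             segments.append(letter)
--     return delimiter.join(segments)
-- ===== Notes on version B (the rewrite author's own statement) =====
-- stated objective: alternative
-- what changed: B builds a list of word-segments (a new segment per uppercase letter, other characters extend the last segment) and lets delimiter.join place the separators, removing A's flat char-array and its positional i != 0 check.
import Mathlib
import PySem

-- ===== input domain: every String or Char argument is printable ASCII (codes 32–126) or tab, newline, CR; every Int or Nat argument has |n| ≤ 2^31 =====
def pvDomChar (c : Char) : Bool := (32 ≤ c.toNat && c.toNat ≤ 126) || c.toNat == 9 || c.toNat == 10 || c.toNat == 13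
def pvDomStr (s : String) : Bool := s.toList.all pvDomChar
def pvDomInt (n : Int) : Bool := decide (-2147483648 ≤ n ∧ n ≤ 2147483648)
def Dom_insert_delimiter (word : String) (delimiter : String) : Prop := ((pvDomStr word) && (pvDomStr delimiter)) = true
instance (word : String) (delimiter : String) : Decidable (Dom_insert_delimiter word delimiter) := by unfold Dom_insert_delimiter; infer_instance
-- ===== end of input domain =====

-- B joins per-uppercase word segments instead of A's flat char array with a positional i != 0 check (alternative decomposition, same cost).

-- ===== PORT A =====
def insert_delimiter (word : String) (delimiter : String) : String :=
  let arr : List (List Char) :=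
    (PySem.List.enumerate word.toList 0).foldl
      (fun acc p =>
        if PySem.Chars.isupper p.2 then
          (if p.1 != 0 then acc ++ [delimiter.toList] else acc) ++ [[PySem.Chars.lowerChar p.2]]
        else acc ++ [[p.2]]) []
  String.ofList (PySem.Chars.join [] arr)

-- ===== PORT B =====
-- segments[-1] += letter (seeding the first segment when none exists), as structural recursion
def pvAppendLast (segs : List (List Char)) (c : Char) : List (List Char) :=
  match segs with
  | [] => [[c]]
  | [s] => [s ++ [c]]
  | s :: rest => s :: pvAppendLast rest c

def insert_delimiter_alt (word : String) (delimiter : String) : String :=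
  let segs : List (List Char) :=
    word.toList.foldl
      (fun segs c =>
        if PySem.Chars.isupper c then segs ++ [[PySem.Chars.lowerChar c]]
        else pvAppendLast segs c) []
  String.ofList (PySem.Chars.join delimiter.toList segs)

-- ===== PRECONDITION & SPEC =====
def Spec_insert_delimiter (word : String) (delimiter : String) (out : String) : Prop := out = insert_delimiter_alt word delimiter
instance (word : String) (delimiter : String) (out : String) : Decidable (Spec_insert_delimiter word delimiter out) := by unfold Spec_insert_delimiter; infer_instance

-- ===== CLAIM (what is proved, stated in full; the proofs are below) =====
def Claim_equal_insert_delimiter : Prop := ∀ (word : String) (delimiter : String), Dom_insert_delimiter word delimiter → Spec_insert_delimiter word delimiter (insert_delimiter word delimiter)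

-- ===== LEMMAS AND PROOFS =====

-- the flat contribution of one non-initial character
def pvPiece (dl : List Char) (c : Char) : List Char :=
  if PySem.Chars.isupper c then dl ++ [PySem.Chars.lowerChar c] else [c]

-- A's loop on indices ≥ 1 appends, per char, the pieces [dl, [low c]] or [[c]]
theorem pvA_tail (dl : List Char) (cs : List Char) :
    ∀ (acc : List (List Char)) (s : Int), 1 ≤ s →
    (PySem.List.enumerate cs s).foldl
      (fun acc p =>
        if PySem.Chars.isupper p.2 then
          (if p.1 != 0 then acc ++ [dl] else acc) ++ [[PySem.Chars.lowerChar p.2]]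
        else acc ++ [[p.2]]) acc
    = acc ++ cs.flatMap (fun c =>
        if PySem.Chars.isupper c then [dl, [PySem.Chars.lowerChar c]] else [[c]]) := by
  induction cs with
  | nil => intro acc s hs; simp [PySem.List.enumerate_nil]
  | cons c cs ih =>
    intro acc s hs
    rw [PySem.List.enumerate_cons, List.foldl_cons]
    have hne : (s != 0) = true := by simp; omega
    by_cases hu : PySem.Chars.isupper c
    · rw [List.flatMap_cons, if_pos hu, if_pos hu, if_pos hne, ih _ (s + 1) (by omega)]
      simp
    · rw [List.flatMap_cons, if_neg hu, if_neg hu, ih _ (s + 1) (by omega)]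
      simp

theorem pv_join_appendLast (dl : List Char) (segs : List (List Char)) (c : Char)
    (h : segs ≠ []) :
    PySem.Chars.join dl (pvAppendLast segs c) = PySem.Chars.join dl segs ++ [c] := by
  induction segs with
  | nil => exact absurd rfl h
  | cons s rest ih =>
    cases rest with
    | nil => simp [pvAppendLast, PySem.Chars.join, List.intercalate]
    | cons t rest' =>
      have h2 := ih (List.cons_ne_nil _ _)
      cases rest' with
      | nil =>
        simp [pvAppendLast, PySem.Chars.join, List.intercalate]
      | cons u rest'' =>
        simp only [pvAppendLast] at h2 ⊢
        rw [PySem.Chars.join_cons_cons, h2]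
        simp [PySem.Chars.join_cons_cons]

theorem pv_join_snoc (dl : List Char) (segs : List (List Char)) (x : List Char)
    (h : segs ≠ []) :
    PySem.Chars.join dl (segs ++ [x]) = PySem.Chars.join dl segs ++ dl ++ x := by
  induction segs with
  | nil => exact absurd rfl h
  | cons s rest ih =>
    cases rest with
    | nil => simp [PySem.Chars.join, List.intercalate]
    | cons t rest' =>
      have h2 := ih (List.cons_ne_nil _ _)
      simp only [List.cons_append] at h2 ⊢
      rw [PySem.Chars.join_cons_cons, h2, PySem.Chars.join_cons_cons]
      simp

theorem pvB_tail (dl : List Char) (cs : List Char) :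
    ∀ (segs : List (List Char)), segs ≠ [] →
    PySem.Chars.join dl
      (cs.foldl
        (fun segs c =>
          if PySem.Chars.isupper c then segs ++ [[PySem.Chars.lowerChar c]]
          else pvAppendLast segs c) segs)
    = PySem.Chars.join dl segs ++ cs.flatMap (pvPiece dl) := by
  induction cs with
  | nil => intro segs h; simp
  | cons c cs ih =>
    intro segs h
    rw [List.foldl_cons, List.flatMap_cons]
    by_cases hu : PySem.Chars.isupper c
    · rw [if_pos hu, ih _ (by simp), pv_join_snoc dl segs _ h]
      simp [pvPiece, hu]
    · rw [if_neg hu,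
        ih _ (by cases segs with | nil => exact absurd rfl h | cons s r => cases r <;> simp [pvAppendLast]),
        pv_join_appendLast dl segs c h]
      simp [pvPiece, hu]

theorem pv_flatten_pieces (dl : List Char) (cs : List Char) :
    (cs.flatMap (fun c =>
      if PySem.Chars.isupper c then [dl, [PySem.Chars.lowerChar c]] else [[c]])).flatten
    = cs.flatMap (pvPiece dl) := by
  induction cs with
  | nil => rfl
  | cons c cs ih =>
    rw [List.flatMap_cons, List.flatMap_cons, List.flatten_append, ih]
    by_cases hu : PySem.Chars.isupper c <;> simp [pvPiece, hu]

theorem pv_join_nil_flatten (l : List (List Char)) :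
    PySem.Chars.join [] l = l.flatten := by
  induction l with
  | nil => rfl
  | cons s rest ih =>
    cases rest with
    | nil => simp [PySem.Chars.join, List.intercalate]
    | cons t rest' => rw [PySem.Chars.join_cons_cons, ih]; simp

-- ===== VERDICT (by name: the statement is the Claim_ definition above) =====
theorem insert_delimiter_spec : Claim_equal_insert_delimiter := by
  intro word delimiter _
  unfold Spec_insert_delimiter insert_delimiter insert_delimiter_alt
  cases hw : word.toList with
  | nil => simp [PySem.List.enumerate_nil, PySem.Chars.join_nil]
  | cons c cs =>
    rw [PySem.List.enumerate_cons, List.foldl_cons, List.foldl_cons]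
    simp only [show ((0:Int) != 0) = false from rfl, Bool.false_eq_true, if_false,
      List.nil_append, show (0:Int) + 1 = 1 from rfl]
    by_cases hu : PySem.Chars.isupper c
    · rw [if_pos hu, if_pos hu,
        pvA_tail delimiter.toList cs _ 1 le_rfl,
        pvB_tail delimiter.toList cs _ (by simp),
        pv_join_nil_flatten, List.flatten_append, pv_flatten_pieces]
      simp [PySem.Chars.join, List.intercalate]
    · rw [if_neg hu, if_neg hu, show pvAppendLast [] c = [[c]] from rfl,
        pvA_tail delimiter.toList cs _ 1 le_rfl,
        pvB_tail delimiter.toList cs _ (by simp),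
        pv_join_nil_flatten, List.flatten_append, pv_flatten_pieces]
      simp [PySem.Chars.join, List.intercalate]
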